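-- pv_equiv track=rewrite | github.com/MacHu-GWU/Tala | tala/util/iterable.py | cycle_running_windows
-- ===== SOURCE A (Python) =====
-- import collections
-- import itertools
--
-- def cycle_running_windows(iterable, size):
--     """generate n-size cycle running windows
--     e.g. iterable = [1,2,3,4,5], size = 2
--     yield: [1,2], [2,3], [3,4], [4,5], [5,1]
--     """
--     fifo = collections.deque(maxlen=size)
--     cycle = itertools.cycle(iterable)
--     counter = itertools.count(1)
--     length = len(iterable)
--     for i in cycle:
--         fifo.append(i)
--         if len(fifo) == size:
--             yield list(fifo)
--             if next(counter) == length: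
--                 break
-- ===== SOURCE B (Python) =====
-- def cycle_running_windows(iterable, size):
--     """generate n-size cycle running windows by slicing a repeated copy of the input"""
--     items = list(iterable)
--     length = len(items)
--     if length:
--         big = items * (size // length + 2)
--         for start in range(length):
--             yield big[start:start + size]
-- ===== Notes on version B (the rewrite author's own statement) =====
-- stated objective: simpler
-- what changed: Replaces the deque/itertools.cycle/itertools.count streaming pipeline with slicing a precomputed repetition of the materialized input, building each window independently by position.
import Mathlib
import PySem

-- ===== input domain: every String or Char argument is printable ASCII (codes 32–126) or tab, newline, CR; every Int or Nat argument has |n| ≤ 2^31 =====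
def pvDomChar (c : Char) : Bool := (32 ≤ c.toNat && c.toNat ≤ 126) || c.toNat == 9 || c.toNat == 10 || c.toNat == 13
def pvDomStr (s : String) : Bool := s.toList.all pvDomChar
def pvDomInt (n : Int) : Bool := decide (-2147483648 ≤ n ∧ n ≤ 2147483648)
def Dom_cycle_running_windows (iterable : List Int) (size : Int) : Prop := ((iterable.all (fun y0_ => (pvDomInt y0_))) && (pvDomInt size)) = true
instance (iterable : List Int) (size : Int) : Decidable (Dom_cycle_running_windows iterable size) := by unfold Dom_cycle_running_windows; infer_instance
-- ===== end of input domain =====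

-- B replaces A's deque/cycle/count streaming pipeline with direct modular indexing (objective: simpler).

-- ===== PORT A =====
-- Loop body of A: each iteration appends the next element of the infinite cycle to the
-- maxlen-`size` deque (append, then drop the front if over maxlen), yields the deque
-- contents when it is full, and breaks after `length` yields.  `fuel` bounds the number
-- of iterations of the (infinite, broken-out-of) `for i in cycle` loop; it is chosen
-- large enough that the break always fires first, so it never changes the result.
def pvLoopA (items : List Int) (size : Int) :
    Nat → List Int → Nat → Nat → List (List Int) → List (List Int)
  | 0, _, _, _, acc => acc.reverse
  | fuel+1, fifo, pos, count, acc =>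
      let i := items.getD (pos % items.length) 0
      let f1 := fifo ++ [i]
      let f2 := if size < (f1.length : Int) then f1.tail else f1
      if (f2.length : Int) = size then
        if count + 1 = items.length then (f2 :: acc).reverse
        else pvLoopA items size fuel f2 (pos+1) (count+1) (f2 :: acc)
      else pvLoopA items size fuel f2 (pos+1) count acc

def cycle_running_windows (iterable : List Int) (size : Int) : List (List Int) :=
  -- `itertools.cycle` of an empty iterable yields nothing, so the for-loop body never runs
  if iterable.isEmpty then []
  else pvLoopA iterable size (size.toNat + iterable.length) [] 0 0 []

-- ===== PORT B =====
def cycle_running_windows_alt (iterable : List Int) (size : Int) : List (List Int) :=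
  let items := iterable
  let length := items.length
  if length ≠ 0 then
    -- big = items * (size // length + 2)   (list repetition; Python clamps a negative count to 0)
    let big := (List.replicate (PySem.Int.floordiv size (length : Int) + 2).toNat items).flatten
    (List.range length).map (fun (start : Nat) =>
      PySem.List.slice big (some ((start : Nat) : Int)) (some (((start : Nat) : Int) + size)))
  else []

-- ===== PRECONDITION & SPEC =====
-- Pre_ excludes size < 0, on which A raises ValueError ("maxlen must be non-negative").
def Pre_cycle_running_windows (iterable : List Int) (size : Int) : Prop := 0 ≤ size
instance (iterable : List Int) (size : Int) : Decidable (Pre_cycle_running_windows iterable size) := by unfold Pre_cycle_running_windows; infer_instance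
def pvWitness_cycle_running_windows : List Int × Int := ([1, 2, 3, 4, 5], 2)
def Spec_cycle_running_windows (iterable : List Int) (size : Int) (out : List (List Int)) : Prop := out = cycle_running_windows_alt iterable size
instance (iterable : List Int) (size : Int) (out : List (List Int)) : Decidable (Spec_cycle_running_windows iterable size out) := by unfold Spec_cycle_running_windows; infer_instance

-- ===== CLAIM (what is proved, stated in full; the proofs are below) =====
def Claim_equal_cycle_running_windows : Prop := ∀ (iterable : List Int) (size : Int), Dom_cycle_running_windows iterable size → Pre_cycle_running_windows iterable size → Spec_cycle_running_windows iterable size (cycle_running_windows iterable size)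

-- ===== LEMMAS AND PROOFS =====

-- the window of length `n` starting at index `s` (B's shape of a window)
def pvWin (items : List Int) (n s : Nat) : List Int :=
  (List.range n).map (fun j => items.getD ((s + j) % items.length) 0)

-- the fifo contents after `p` appends with maxlen `n`
def pvFifo (items : List Int) (n p : Nat) : List Int :=
  (List.range (min p n)).map (fun j => items.getD ((p - min p n + j) % items.length) 0)

theorem pvFifo_full (items : List Int) (n p : Nat) (h : n ≤ p) :
    pvFifo items n p = pvWin items n (p - n) := by
  simp [pvFifo, pvWin, Nat.min_eq_right h]

theorem pvFifo_length (items : List Int) (n p : Nat) :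
    (pvFifo items n p).length = min p n := by simp [pvFifo]

theorem pvFifo_append_lt (items : List Int) (n p : Nat) (h : p < n) :
    pvFifo items n p ++ [items.getD (p % items.length) 0] = pvFifo items n (p+1) := by
  have h1 : min p n = p := Nat.min_eq_left (Nat.le_of_lt h)
  have h2 : min (p+1) n = p + 1 := Nat.min_eq_left h
  simp [pvFifo, h1, h2, List.range_succ]

theorem pvWin_shift (items : List Int) (n s : Nat) :
    pvWin items n s ++ [items.getD ((s + n) % items.length) 0]
      = items.getD (s % items.length) 0 :: pvWin items n (s+1) := by
  have l1 : List.map (fun j => items.getD ((s + j) % items.length) 0) (List.range (n+1))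
      = List.map (fun j => items.getD ((s + j) % items.length) 0) (List.range n)
        ++ [items.getD ((s + n) % items.length) 0] := by
    rw [List.range_succ]; simp
  have l2 : List.map (fun j => items.getD ((s + j) % items.length) 0) (List.range (n+1))
      = items.getD (s % items.length) 0
        :: List.map (fun j => items.getD ((s + 1 + j) % items.length) 0) (List.range n) := by
    rw [List.range_succ_eq_map]
    simp only [List.map_cons, List.map_map, Nat.add_zero]
    congr 1
    apply List.map_congr_left
    intro j _
    simp only [Function.comp]
    rw [show s + (j+1) = s + 1 + j from by omega]
  simpa [pvWin] using l1.symm.trans l2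

theorem pvFifo_append_full (items : List Int) (n p : Nat) (_hn : 1 ≤ n) (h : n ≤ p) :
    (pvFifo items n p ++ [items.getD (p % items.length) 0]).tail = pvFifo items n (p+1) := by
  rw [pvFifo_full items n p h, pvFifo_full items n (p+1) (Nat.le_succ_of_le h)]
  rw [show p % items.length = (p - n + n) % items.length from by rw [Nat.sub_add_cancel h]]
  rw [pvWin_shift items n (p - n), List.tail_cons]
  congr 1
  omega

-- the loop invariant: at entry of an iteration, `p` appends have been done,
-- the fifo is `pvFifo items n p`, and `p + 1 - n` windows have been yielded (size ≥ 1 case).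
theorem pvLoopA_inv (items : List Int) (n : Nat) (hn : 1 ≤ n) (hne : items ≠ []) :
    ∀ fuel p acc, n + items.length ≤ p + fuel + 1 → p + 2 ≤ n + items.length →
    pvLoopA items (n : Int) fuel (pvFifo items n p) p (p + 1 - n) acc
      = acc.reverse ++ (((List.range items.length).map (pvWin items n)).drop (p + 1 - n)) := by
  intro fuel
  induction fuel with
  | zero => intro p acc hf hp; omega
  | succ fuel ih =>
    intro p acc hf hp
    set L := items.length with hL
    have hL1 : 1 ≤ L := by
      cases items with
      | nil => exact absurd rfl hne
      | cons a t => simp [hL]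
    rw [pvLoopA]
    by_cases hcase : p < n
    · -- fill phase (and possibly the first yield)
      have hf2 : (if (n:Int) < ((pvFifo items n p ++ [items.getD (p % items.length) 0]).length : Int)
          then (pvFifo items n p ++ [items.getD (p % items.length) 0]).tail
          else (pvFifo items n p ++ [items.getD (p % items.length) 0])) = pvFifo items n (p+1) := by
        rw [if_neg, pvFifo_append_lt items n p hcase]
        simp only [List.length_append, pvFifo_length, List.length_cons, List.length_nil]
        have : min p n = p := Nat.min_eq_left (Nat.le_of_lt hcase)
        omega
      rw [hf2]
      by_cases hfull : p + 1 = n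
      · -- first yield: window 0
        have hlen : ((pvFifo items n (p+1)).length : Int) = (n : Int) := by
          rw [pvFifo_length]; omega
        rw [if_pos hlen]
        have hc0 : p + 1 - n = 0 := by omega
        rw [hc0]
        have hwin : pvFifo items n (p+1) = pvWin items n 0 := by
          have h := pvFifo_full items n (p+1) (by omega)
          rwa [show p + 1 - n = 0 from by omega] at h
        have hdrop : ((List.range L).map (pvWin items n)).drop 0
            = pvWin items n 0 :: ((List.range L).map (pvWin items n)).drop 1 := by
          rw [List.drop_eq_getElem_cons (by simp; omega)]
          simp
        by_cases hbreak : 0 + 1 = L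
        · rw [if_pos hbreak]
          rw [hwin, List.reverse_cons, hdrop]
          have h1 : ((List.range L).map (pvWin items n)).drop 1 = [] := by
            apply List.drop_eq_nil_of_le; simp; omega
          simp [h1]
        · rw [if_neg hbreak]
          rw [show (0:Nat) + 1 = (p + 1) + 1 - n from by omega]
          rw [ih (p+1) (pvFifo items n (p+1) :: acc) (by omega) (by omega)]
          rw [show (p + 1) + 1 - n = 1 from by omega]
          rw [hwin, List.reverse_cons, List.append_assoc, hdrop, List.singleton_append]
      · -- still filling
        have hlen : ¬ ((pvFifo items n (p+1)).length : Int) = (n : Int) := by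
          rw [pvFifo_length]
          have : min (p+1) n = p+1 := Nat.min_eq_left (by omega)
          omega
        rw [if_neg hlen]
        rw [show p + 1 - n = (p + 1) + 1 - n from by omega]
        exact ih (p+1) acc (by omega) (by omega)
    · -- steady state: fifo full, yield every iteration
      replace hcase := Nat.le_of_not_lt hcase
      have hf2 : (if (n:Int) < ((pvFifo items n p ++ [items.getD (p % items.length) 0]).length : Int)
          then (pvFifo items n p ++ [items.getD (p % items.length) 0]).tail
          else (pvFifo items n p ++ [items.getD (p % items.length) 0])) = pvFifo items n (p+1) := by
        rw [if_pos, pvFifo_append_full items n p hn hcase]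
        simp only [List.length_append, pvFifo_length, List.length_cons, List.length_nil]
        have : min p n = n := Nat.min_eq_right hcase
        omega
      rw [hf2]
      have hlen : ((pvFifo items n (p+1)).length : Int) = (n : Int) := by
        rw [pvFifo_length]
        have : min (p+1) n = n := Nat.min_eq_right (by omega)
        omega
      rw [if_pos hlen]
      set c := p + 1 - n with hc
      have hcL : c < L := by omega
      have hwin : pvFifo items n (p+1) = pvWin items n c := by
        have h := pvFifo_full items n (p+1) (by omega)
        rwa [← hc] at h
      have hdrop : ((List.range L).map (pvWin items n)).drop c
          = pvWin items n c :: ((List.range L).map (pvWin items n)).drop (c+1) := by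
        rw [List.drop_eq_getElem_cons (by simp; omega)]
        simp
      by_cases hbreak : c + 1 = L
      · rw [if_pos hbreak]
        rw [hwin, List.reverse_cons, hdrop]
        have h1 : ((List.range L).map (pvWin items n)).drop (c+1) = [] := by
          apply List.drop_eq_nil_of_le; simp; omega
        simp [h1]
      · rw [if_neg hbreak]
        rw [show c + 1 = (p + 1) + 1 - n from by omega]
        rw [ih (p+1) (pvFifo items n (p+1) :: acc) (by omega) (by omega)]
        rw [show (p + 1) + 1 - n = c + 1 from by omega]
        rw [hwin, List.reverse_cons, List.append_assoc, hdrop, List.singleton_append]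

-- size = 0 case: the fifo stays empty and every iteration yields []
theorem pvLoopA_zero (items : List Int) :
    ∀ fuel c acc, c < items.length → items.length ≤ c + fuel →
    pvLoopA items 0 fuel [] c c acc
      = acc.reverse ++ List.replicate (items.length - c) [] := by
  intro fuel
  induction fuel with
  | zero => intro c acc h1 h2; omega
  | succ fuel ih =>
    intro c acc h1 h2
    rw [pvLoopA]
    simp only [List.nil_append, List.length_cons, List.length_nil, List.tail_cons]
    norm_num
    by_cases hbreak : c + 1 = items.length
    · rw [if_pos hbreak]
      have : items.length - c = 1 := by omega
      simp [this]
    · rw [if_neg hbreak]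
      rw [ih (c+1) ([] :: acc) (by omega) (by omega)]
      have : items.length - c = (items.length - (c+1)) + 1 := by omega
      rw [this, List.replicate_succ, List.reverse_cons, List.append_assoc]
      simp

-- big[k] = items[k % len] for the repeated list
theorem pvBig_getD (items : List Int) :
    ∀ (r k : Nat), k < r * items.length →
    (List.flatten (List.replicate r items)).getD k 0 = items.getD (k % items.length) 0 := by
  intro r
  induction r with
  | zero => intro k hk; omega
  | succ r ih =>
    intro k hk
    rw [Nat.succ_mul] at hk
    rw [List.replicate_succ, List.flatten_cons]
    by_cases h : k < items.length
    · rw [List.getD_append items ((List.replicate r items).flatten) 0 k h, Nat.mod_eq_of_lt h]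
    · have h' : items.length ≤ k := Nat.le_of_not_lt h
      rw [List.getD_append_right items ((List.replicate r items).flatten) 0 k h',
          ih (k - items.length) (by omega), Nat.mod_eq_sub_mod h']

-- a slice of the repeated list is exactly the modular window
theorem pvSliceWin (items : List Int) (n s : Nat) (hne : items ≠ []) (hs : s < items.length) :
    ((List.flatten (List.replicate (n / items.length + 2) items)).drop s).take n
      = pvWin items n s := by
  have hL1 : 0 < items.length := List.length_pos_iff.mpr hne
  set big := List.flatten (List.replicate (n / items.length + 2) items) with hbig
  have hlen : big.length = (n / items.length + 2) * items.length := by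
    simp [hbig, List.length_flatten, Nat.mul_comm]
  have hge : s + n ≤ big.length := by
    rw [hlen, Nat.add_mul]
    have h1 := Nat.div_add_mod n items.length
    rw [Nat.mul_comm items.length (n / items.length)] at h1
    have h2 := Nat.mod_lt n hL1
    omega
  apply List.ext_getElem
  · simp [pvWin]; omega
  · intro j h1 h2
    have hj : j < n := by simpa [pvWin] using h2
    have hsj : s + j < big.length := by omega
    rw [List.getElem_take, List.getElem_drop]
    simp only [pvWin, List.getElem_map, List.getElem_range]
    rw [← List.getD_eq_getElem big 0 hsj, hbig]
    exact pvBig_getD items (n / items.length + 2) (s + j) (by omega)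

-- ===== VERDICT (by name: the statement is the Claim_ definition above) =====
theorem cycle_running_windows_spec : Claim_equal_cycle_running_windows := by
  intro items size _hdom hpre
  unfold Spec_cycle_running_windows
  unfold Pre_cycle_running_windows at hpre
  unfold cycle_running_windows cycle_running_windows_alt
  obtain ⟨n, rfl⟩ : ∃ m : Nat, (m : Int) = size := ⟨size.toNat, Int.toNat_of_nonneg hpre⟩
  by_cases hne : items.isEmpty
  · have : items = [] := List.isEmpty_iff.mp hne
    subst this
    simp
  · rw [if_neg hne]
    have hne' : items ≠ [] := by simpa [List.isEmpty_iff] using hne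
    have hL1 : 1 ≤ items.length := List.length_pos_iff.mpr hne'
    -- B's slices of the repeated list are exactly the modular windows
    have halt : (if items.length ≠ 0 then
        (List.range items.length).map (fun (start : Nat) =>
          PySem.List.slice
            ((List.replicate (PySem.Int.floordiv (n : Int) ((items.length : Nat) : Int) + 2).toNat items).flatten)
            (some ((start : Nat) : Int)) (some (((start : Nat) : Int) + (n : Int))))
      else []) = (List.range items.length).map (pvWin items n) := by
      rw [if_pos (by omega)]
      have hfd : (PySem.Int.floordiv (n : Int) ((items.length : Nat) : Int) + 2).toNat
          = n / items.length + 2 := by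
        rw [PySem.Int.floordiv_natCast]
        rw [show ((↑(n / items.length) : Int) + 2) = ((n / items.length + 2 : Nat) : Int) from by push_cast; ring]
        exact Int.toNat_natCast _
      rw [hfd]
      apply List.map_congr_left
      intro s hs
      rw [PySem.List.slice_natCast_add]
      exact pvSliceWin items n s hne' (by simpa using hs)
    rw [halt]
    simp only [Int.toNat_natCast]
    by_cases h0 : n = 0
    · subst h0
      simp only [Nat.cast_zero, Nat.zero_add]
      rw [pvLoopA_zero items items.length 0 [] (by omega) (by omega)]
      have : pvWin items 0 = fun _ => ([] : List Int) := by
        funext s; simp [pvWin]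
      rw [this]
      simp [List.map_const']
    · have hn1 : 1 ≤ n := by omega
      have key := pvLoopA_inv items n hn1 hne' (n + items.length) 0 [] (by omega) (by omega)
      rw [show pvFifo items n 0 = [] from by simp [pvFifo],
          show 0 + 1 - n = 0 from by omega] at key
      rw [key]
      simp
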